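-- pv_equiv track=rewrite | github.com/cstevenson98/Spin-Chains-py | src/spin_alg.py | Hop
-- ===== SOURCE A (Python) =====
-- def Hop(a, boundary_conditions):
--     N = len(a)
--     out = []
--     for i in range(N):
--         temp = list(a)
--         if not(i == N-1):
--             if not(a[i] == a[i+1]):
--                 store = a[i]
--                 temp[i] = temp[i+1]
--                 temp[i+1] = store
--                 out.append(''.join(temp))
--         if i == N-1 and boundary_conditions == 'PBC':
--             if not(a[N-1] == a[0]):
--                 store = a[N-1]
--                 temp[N-1] = temp[0]
--                 temp[0] = store
--                 out.append(''.join(temp))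
--
--     return out
-- ===== SOURCE B (Python) =====
-- def Hop(a, boundary_conditions):
--     # prefix/suffix descent over the string: repeatedly look at the first two
--     # characters of the remaining suffix, emit the swapped string if they
--     # differ, then move the head into the prefix; the PBC wrap swap is a
--     # single closed-form step afterwards.
--     out = []
--     prefix, rest = '', a
--     while len(rest) >= 2:
--         x, y = rest[0], rest[1]
--         if x != y:
--             out.append(prefix + y + x + rest[2:])
--         prefix, rest = prefix + x, rest[1:]
--     if boundary_conditions == 'PBC' and len(a) > 1 and a[0] != a[-1]:
--         out.append(a[-1] + a[1:-1] + a[0])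
--     return out
-- ===== Notes on version B (the rewrite author's own statement) =====
-- stated objective: faster
-- what changed: B replaces A's index loop (which copies the whole string into a list, swaps in place and re-joins on every iteration, with an embedded i==N-1 special case) by an iterative prefix/suffix descent that emits each swapped string by direct concatenation only when the two leading suffix characters differ, and performs the PBC wrap swap as one closed-form step after the loop.
import Mathlib
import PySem

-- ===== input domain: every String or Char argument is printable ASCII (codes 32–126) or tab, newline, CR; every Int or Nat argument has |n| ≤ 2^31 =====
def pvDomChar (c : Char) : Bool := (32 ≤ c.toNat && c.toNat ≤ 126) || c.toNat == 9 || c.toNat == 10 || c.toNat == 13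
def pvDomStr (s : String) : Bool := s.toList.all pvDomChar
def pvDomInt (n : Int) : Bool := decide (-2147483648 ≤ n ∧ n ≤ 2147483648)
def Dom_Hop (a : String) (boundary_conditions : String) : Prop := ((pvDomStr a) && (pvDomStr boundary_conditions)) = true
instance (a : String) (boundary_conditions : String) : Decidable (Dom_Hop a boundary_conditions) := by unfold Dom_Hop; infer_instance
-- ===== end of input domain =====

-- B replaces A's index loop (per-iteration list copy + join) by an iterative prefix/suffix
-- descent emitting swapped strings by concatenation, with the PBC wrap swap as one closed-form
-- step after the loop; objective: faster (measured, constant factor).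

-- ===== PORT A =====
-- indices are always in range in reachable branches, so List.getD is exact for Python's a[i]
def Hop (a : String) (boundary_conditions : String) : List String :=
  let cs := a.toList
  let N := cs.length
  (List.range N).foldl (fun out i =>
    let temp := cs
    let out :=
      if ¬ (i = N - 1) then
        if ¬ (cs.getD i ' ' = cs.getD (i+1) ' ') then
          let store := cs.getD i ' '
          let temp := temp.set i (temp.getD (i+1) ' ')
          let temp := temp.set (i+1) store
          out ++ [String.ofList temp]
        else out
      else out
    if i = N - 1 ∧ boundary_conditions = "PBC" then
      if ¬ (cs.getD (N-1) ' ' = cs.getD 0 ' ') then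
        let store := cs.getD (N-1) ' '
        let temp := temp.set (N-1) (temp.getD 0 ' ')
        let temp := temp.set 0 store
        out ++ [String.ofList temp]
      else out
    else out) []

-- ===== PORT B =====
-- Source B's while loop over (out, prefix, rest), over character lists
def HopGo (out : List String) (pre : List Char) : List Char → List String
  | x :: y :: t =>
      HopGo (out ++ (if ¬ (x = y) then [String.ofList (pre ++ y :: x :: t)] else []))
        (pre ++ [x]) (y :: t)
  | _ => out

-- a[1:-1] is exact as (cs.drop 1).dropLast; a[0], a[-1] as getD with in-range indices
def Hop_alt (a : String) (boundary_conditions : String) : List String :=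
  let cs := a.toList
  let out := HopGo [] [] cs
  if boundary_conditions = "PBC" ∧ cs.length > 1 ∧ ¬ (cs.getD 0 ' ' = cs.getD (cs.length - 1) ' ') then
    out ++ [String.ofList ([cs.getD (cs.length - 1) ' '] ++ (cs.drop 1).dropLast ++ [cs.getD 0 ' '])]
  else out

-- ===== PRECONDITION & SPEC =====
def Spec_Hop (a : String) (boundary_conditions : String) (out : List String) : Prop := out = Hop_alt a boundary_conditions
instance (a : String) (boundary_conditions : String) (out : List String) : Decidable (Spec_Hop a boundary_conditions out) := by unfold Spec_Hop; infer_instance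

-- ===== CLAIM (what is proved, stated in full; the proofs are below) =====
def Claim_equal_Hop : Prop := ∀ (a : String) (boundary_conditions : String), Dom_Hop a boundary_conditions → Spec_Hop a boundary_conditions (Hop a boundary_conditions)

-- ===== LEMMAS AND PROOFS =====

-- A's loop body, over the character list
def stepA (cs : List Char) (bc : String) (out : List String) (i : Nat) : List String :=
  let N := cs.length
  let temp := cs
  let out :=
    if ¬ (i = N - 1) then
      if ¬ (cs.getD i ' ' = cs.getD (i+1) ' ') then
        let store := cs.getD i ' '
        let temp := temp.set i (temp.getD (i+1) ' ')
        let temp := temp.set (i+1) store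
        out ++ [String.ofList temp]
      else out
    else out
  if i = N - 1 ∧ bc = "PBC" then
    if ¬ (cs.getD (N-1) ' ' = cs.getD 0 ' ') then
      let store := cs.getD (N-1) ' '
      let temp := temp.set (N-1) (temp.getD 0 ' ')
      let temp := temp.set 0 store
      out ++ [String.ofList temp]
    else out
  else out

-- what one interior index contributes, in swapped-segments form
def emit (cs : List Char) (i : Nat) : List String :=
  if ¬ (cs.getD i ' ' = cs.getD (i+1) ' ') then
    [String.ofList (cs.take i ++ [cs.getD (i+1) ' ', cs.getD i ' '] ++ cs.drop (i+2))]
  else []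

lemma Hop_eq (a bc : String) :
    Hop a bc = (List.range a.toList.length).foldl (stepA a.toList bc) [] := rfl

lemma set_last (l : List Char) (v : Char) (h : l ≠ []) :
    l.set (l.length - 1) v = l.dropLast ++ [v] := by
  induction l with
  | nil => simp at h
  | cons x t ih =>
    cases t with
    | nil => simp
    | cons y t' =>
      simp only [List.length_cons, Nat.add_sub_cancel, List.set_cons_succ,
        List.dropLast_cons₂, List.cons_append, List.cons.injEq, true_and]
      have := ih (by simp)
      simpa using this

lemma swap_adj (cs : List Char) (i : Nat) (h : i + 1 < cs.length) :
    (cs.set i (cs.getD (i+1) ' ')).set (i+1) (cs.getD i ' ')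
      = cs.take i ++ [cs.getD (i+1) ' ', cs.getD i ' '] ++ cs.drop (i+2) := by
  induction cs generalizing i with
  | nil => simp at h
  | cons x t ih =>
    cases i with
    | zero =>
      cases t with
      | nil => simp at h
      | cons y t' => rfl
    | succ k =>
      have h' : k + 1 < t.length := by simpa using h
      have hd : List.drop (k+1+2) (x::t) = List.drop (k+2) t := rfl
      simp only [List.getD_cons_succ, List.set_cons_succ, List.take_succ_cons, List.cons_append, hd]
      rw [ih k h']

lemma swap_wrap (cs : List Char) (h : 2 ≤ cs.length) :
    (cs.set (cs.length - 1) (cs.getD 0 ' ')).set 0 (cs.getD (cs.length - 1) ' ')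
      = [cs.getD (cs.length - 1) ' '] ++ ((cs.take (cs.length - 1)).drop 1) ++ [cs.getD 0 ' '] := by
  obtain ⟨x, t, rfl⟩ : ∃ x t, cs = x :: t := by
    cases cs with
    | nil => simp at h
    | cons x t => exact ⟨x, t, rfl⟩
  have ht : t ≠ [] := by cases t <;> simp_all
  have hl : (x :: t).length - 1 = t.length := by simp
  rw [hl]
  have hset : (x :: t).set t.length (List.getD (x :: t) 0 ' ') = x :: (t.set (t.length - 1) x) := by
    obtain ⟨y, t', rfl⟩ : ∃ y t', t = y :: t' := by
      cases t with
      | nil => simp at ht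
      | cons y t' => exact ⟨y, t', rfl⟩
    simp [List.getD]
  rw [hset, set_last t x ht, List.set_cons_zero]
  have htake : (x :: t).take t.length = x :: t.dropLast := by
    obtain ⟨y, t', rfl⟩ : ∃ y t', t = y :: t' := by
      cases t with
      | nil => simp at ht
      | cons y t' => exact ⟨y, t', rfl⟩
    simp only [List.length_cons, List.take_succ_cons, List.cons.injEq, true_and]
    rw [List.dropLast_eq_take]
    simp
  rw [htake]
  simp

-- A's interior loop in extend form
lemma interior_foldl (cs : List Char) (bc : String) :
    (List.range (cs.length - 1)).foldl (stepA cs bc) []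
      = (List.range (cs.length - 1)).flatMap (emit cs) := by
  have h1 : (List.range (cs.length - 1)).foldl (stepA cs bc) []
      = (List.range (cs.length - 1)).foldl (fun out i => out ++ emit cs i) [] := by
    apply PySem.List.foldl_congr_mem
    intro acc i hi
    have hi' : i < cs.length - 1 := List.mem_range.mp hi
    have hne : ¬ (i = cs.length - 1) := by omega
    have h1 : i + 1 < cs.length := by omega
    simp only [stepA, emit]
    rw [if_pos hne, if_neg (fun hh => hne hh.1)]
    by_cases hc : cs.getD i ' ' = cs.getD (i+1) ' '
    · rw [if_neg (not_not_intro hc), if_neg (not_not_intro hc)]; simp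
    · rw [if_pos hc, if_pos hc, swap_adj cs i h1]
  rw [h1, PySem.List.foldl_append_eq_flatMap]
  simp

-- B's recursion produces exactly the interior contributions
lemma HopGo_spec (rest pre : List Char) (out : List String) :
    HopGo out pre rest
      = out ++ (List.range (rest.length - 1)).flatMap (fun i =>
          if ¬ (rest.getD i ' ' = rest.getD (i+1) ' ') then
            [String.ofList (pre ++ (rest.take i ++ [rest.getD (i+1) ' ', rest.getD i ' '] ++ rest.drop (i+2)))]
          else []) := by
  induction rest generalizing pre out with
  | nil => simp [HopGo]
  | cons x t ih =>
    cases t with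
    | nil => simp [HopGo]
    | cons y t' =>
      have hlen : (x :: y :: t').length - 1 = t'.length + 1 := by simp
      rw [hlen, List.range_succ_eq_map, List.flatMap_cons, List.flatMap_map]
      have h0 : (if ¬ ((x :: y :: t').getD 0 ' ' = (x :: y :: t').getD 1 ' ') then
            [String.ofList (pre ++ ((x :: y :: t').take 0 ++ [(x :: y :: t').getD 1 ' ', (x :: y :: t').getD 0 ' '] ++ (x :: y :: t').drop 2))]
          else []) = (if ¬ (x = y) then [String.ofList (pre ++ y :: x :: t')] else []) := by
        simp [List.getD]
      have hrec : HopGo (out ++ (if ¬ (x = y) then [String.ofList (pre ++ y :: x :: t')] else [])) (pre ++ [x]) (y :: t')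
          = (out ++ (if ¬ (x = y) then [String.ofList (pre ++ y :: x :: t')] else []))
              ++ (List.range t'.length).flatMap (fun i =>
              if ¬ ((y :: t').getD i ' ' = (y :: t').getD (i+1) ' ') then
                [String.ofList ((pre ++ [x]) ++ ((y :: t').take i ++ [(y :: t').getD (i+1) ' ', (y :: t').getD i ' '] ++ (y :: t').drop (i+2)))]
              else []) := by
        have := ih (pre ++ [x]) (out ++ (if ¬ (x = y) then [String.ofList (pre ++ y :: x :: t')] else []))
        simpa using this
      show HopGo (out ++ (if ¬ (x = y) then [String.ofList (pre ++ y :: x :: t')] else [])) (pre ++ [x]) (y :: t') = _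
      rw [hrec, h0, List.append_assoc]
      congr 2
      apply List.flatMap_congr
      intro i _
      have hg1 : (x :: y :: t').getD (i+1) ' ' = (y :: t').getD i ' ' := rfl
      have hg2 : (x :: y :: t').getD (i+1+1) ' ' = (y :: t').getD (i+1) ' ' := rfl
      have ht : (x :: y :: t').take (i+1) = x :: (y :: t').take i := rfl
      have hd : (x :: y :: t').drop (i+1+2) = (y :: t').drop (i+2) := rfl
      rw [hg1, hg2, ht, hd]
      simp

-- the last A iteration
lemma last_step (cs : List Char) (bc : String) (L : List String) (h : cs ≠ []) :
    stepA cs bc L (cs.length - 1)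
      = (if bc = "PBC" ∧ cs.length > 1 ∧ ¬ (cs.getD 0 ' ' = cs.getD (cs.length - 1) ' ') then
          L ++ [String.ofList ([cs.getD (cs.length - 1) ' '] ++ (cs.drop 1).dropLast ++ [cs.getD 0 ' '])]
        else L) := by
  simp only [stepA, not_true, if_false, true_and]
  by_cases hbc : bc = "PBC"
  · rw [if_pos hbc]
    by_cases hc : cs.getD (cs.length - 1) ' ' = cs.getD 0 ' '
    · rw [if_neg (not_not_intro hc), if_neg]
      rintro ⟨-, -, hne⟩
      exact hne hc.symm
    · have h2 : 2 ≤ cs.length := by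
        rcases cs with _ | ⟨x, _ | ⟨y, t⟩⟩
        · exact absurd rfl h
        · exact absurd rfl hc
        · simp
      rw [if_pos hc, swap_wrap cs h2,
        if_pos ⟨hbc, by omega, fun hh => hc hh.symm⟩]
      have : (cs.take (cs.length - 1)).drop 1 = (cs.drop 1).dropLast := by
        rw [List.drop_take, List.dropLast_eq_take]
        congr 1
        simp
      rw [this]
  · rw [if_neg hbc, if_neg (fun hh => hbc hh.1)]

lemma main_eq (a bc : String) : Hop a bc = Hop_alt a bc := by
  rw [Hop_eq]
  show _ = Hop_alt a bc
  unfold Hop_alt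
  simp only []
  set cs := a.toList with hcs
  by_cases h0 : cs.length = 0
  · have : cs = [] := List.length_eq_zero_iff.mp h0
    rw [this]
    simp [HopGo]
  · have hsplit : List.range cs.length = List.range (cs.length - 1) ++ [cs.length - 1] := by
      conv_lhs => rw [show cs.length = (cs.length - 1) + 1 by omega]
      rw [List.range_succ]
    rw [hsplit, List.foldl_append, interior_foldl cs bc]
    simp only [List.foldl_cons, List.foldl_nil]
    rw [last_step cs bc _ (by simpa using List.length_pos_iff.mp (by omega)),
      HopGo_spec cs [] []]
    simp only [List.nil_append]
    split <;> rfl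

-- ===== VERDICT (by name: the statement is the Claim_ definition above) =====
theorem Hop_spec : Claim_equal_Hop := by
  intro a bc _
  unfold Spec_Hop
  exact main_eq a bc
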